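-- pv_equiv track=rewrite | github.com/jennyzzt/LLM_debate_on_ARC | ARC_gen_agents1_rounds2_openai/3aa6fb7a/agent0/algo.py | solve
-- ===== SOURCE A (Python) =====
-- def solve(input_grid):
--     # Initialize the output grid with the same dimensions as the input grid.
--     output = [[cell for cell in row] for row in input_grid]
--
--     # Define the dimensions of the grid.
--     rows = len(input_grid)
--     cols = len(input_grid[0]) if rows > 0 else 0
--
--     # Function to check if a position is valid within the grid.
--     def is_valid(r, c):
--         return 0 <= r < rows and 0 <= c < cols
--
--     # Iterate through each cell in the grid.
--     for r in range(rows):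
--         for c in range(cols):
--             # If the current cell contains an 8, check its neighbors.
--             if input_grid[r][c] == 8:
--                 # List of possible neighbor positions (up, down, left, right).
--                 neighbors = [(r-1, c), (r+1, c), (r, c-1), (r, c+1)]
--                 for nr, nc in neighbors:
--                     # If the neighbor position is valid and the cell is empty (0), fill it with a 1.
--                     if is_valid(nr, nc) and input_grid[nr][nc] == 0:
--                         output[nr][nc] = 1
--
--     return output
-- ===== SOURCE B (Python) =====
-- def solve(input_grid):
--     rows = len(input_grid)
--     cols = len(input_grid[0]) if rows > 0 else 0
--
--     def val(r, c):
--         return input_grid[r][c] if 0 <= r < rows and 0 <= c < cols else None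
--
--     out = []
--     for r, row in enumerate(input_grid):
--         new_row = list(row)
--         for c in range(cols):
--             if row[c] == 0 and 8 in (val(r - 1, c), val(r + 1, c), val(r, c - 1), val(r, c + 1)):
--                 new_row[c] = 1
--         out.append(new_row)
--     return out
-- ===== Notes on version B (the rewrite author's own statement) =====
-- stated objective: alternative
-- what changed: B gathers: for each empty cell it inspects its four orthogonal neighbours for an 8, instead of A scattering writes from each 8-cell to its neighbours; B builds each output row in one pass.
import Mathlib
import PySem

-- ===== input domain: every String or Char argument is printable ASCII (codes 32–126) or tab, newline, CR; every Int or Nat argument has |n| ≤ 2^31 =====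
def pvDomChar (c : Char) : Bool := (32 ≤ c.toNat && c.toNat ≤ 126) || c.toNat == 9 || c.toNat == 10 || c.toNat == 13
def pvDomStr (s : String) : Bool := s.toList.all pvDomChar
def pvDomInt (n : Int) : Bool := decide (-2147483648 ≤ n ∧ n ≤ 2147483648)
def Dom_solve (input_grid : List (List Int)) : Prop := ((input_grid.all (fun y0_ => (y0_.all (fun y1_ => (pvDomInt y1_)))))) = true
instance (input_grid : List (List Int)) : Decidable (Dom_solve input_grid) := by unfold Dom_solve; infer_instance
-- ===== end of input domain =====

-- B gathers into each empty cell from its four neighbours instead of A's scattering from each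
-- 8-cell to its neighbours; same cost, alternative decomposition (equal return values proved below).

-- ===== PORT A =====
-- input_grid[r][c] read / out[r][c] write; in both ports every use is guarded so the
-- index pair is nonnegative and in range, where pyGetD/pySetD are exact.
def getC (g : List (List Int)) (r c : Int) : Int :=
  PySem.List.pyGetD (PySem.List.pyGetD g r []) c 0

def setCell (g : List (List Int)) (r c : Int) (v : Int) : List (List Int) :=
  PySem.List.pySetD g r (PySem.List.pySetD (PySem.List.pyGetD g r []) c v)

def isValid (rows cols r c : Int) : Bool :=
  decide (0 ≤ r ∧ r < rows) && decide (0 ≤ c ∧ c < cols)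

def solve (input_grid : List (List Int)) : List (List Int) :=
  let output := input_grid.map (fun row => row.map (fun cell => cell))
  let rows : Int := PySem.List.len input_grid
  let cols : Int := if rows > 0 then PySem.List.len (PySem.List.pyGetD input_grid 0 []) else 0
  (PySem.List.pyRange 0 rows 1).foldl (fun out r =>
    (PySem.List.pyRange 0 cols 1).foldl (fun out c =>
      if getC input_grid r c == 8 then
        ([(r-1,c),(r+1,c),(r,c-1),(r,c+1)] : List (Int × Int)).foldl (fun out p =>
          if isValid rows cols p.1 p.2 && (getC input_grid p.1 p.2 == 0) then
            setCell out p.1 p.2 1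
          else out) out
      else out) out) output

-- ===== PORT B =====
def solve_alt (input_grid : List (List Int)) : List (List Int) :=
  let rows : Int := PySem.List.len input_grid
  let cols : Int := if rows > 0 then PySem.List.len (PySem.List.pyGetD input_grid 0 []) else 0
  let val : Int → Int → Option Int := fun r c =>
    if 0 ≤ r ∧ r < rows ∧ 0 ≤ c ∧ c < cols then some (getC input_grid r c) else none
  (PySem.List.enumerate input_grid 0).map (fun p =>
    (PySem.List.pyRange 0 cols 1).foldl (fun newRow c =>
      if (PySem.List.pyGetD p.2 c 0 == 0) &&
         ([val (p.1-1) c, val (p.1+1) c, val p.1 (c-1), val p.1 (c+1)].contains (some 8))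
      then PySem.List.pySetD newRow c 1 else newRow) p.2)

-- ===== PRECONDITION & SPEC =====
-- Pre_ excludes exactly the ragged grids on which Python A raises IndexError: some row
-- shorter than the first row (A indexes every row up to cols = len(input_grid[0])).
def Pre_solve (input_grid : List (List Int)) : Prop :=
  ∀ row ∈ input_grid, input_grid.headI.length ≤ row.length
instance (input_grid : List (List Int)) : Decidable (Pre_solve input_grid) := by
  unfold Pre_solve; infer_instance

def pvWitness_solve : List (List Int) := [[8, 0], [0, 3]]

def Spec_solve (input_grid : List (List Int)) (out : List (List Int)) : Prop := out = solve_alt input_grid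
instance (input_grid : List (List Int)) (out : List (List Int)) : Decidable (Spec_solve input_grid out) := by unfold Spec_solve; infer_instance

-- ===== CLAIM (what is proved, stated in full; the proofs are below) =====
def Claim_equal_solve : Prop := ∀ (input_grid : List (List Int)), Dom_solve input_grid → Pre_solve input_grid → Spec_solve input_grid (solve input_grid)

-- ===== LEMMAS AND PROOFS =====

-- cell value at Nat coordinates (0 outside the grid)
def cellN (g : List (List Int)) (i j : Nat) : Int := (g.getD i []).getD j 0

-- some orthogonal neighbour of (i,j) inside the rows × cols box holds an 8
def nbr8 (g : List (List Int)) (i j : Nat) : Bool :=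
  (decide (1 ≤ i) && (cellN g (i-1) j == 8)) ||
  (decide (i+1 < g.length) && (cellN g (i+1) j == 8)) ||
  (decide (1 ≤ j) && (cellN g i (j-1) == 8)) ||
  (decide (j+1 < g.headI.length) && (cellN g i (j+1) == 8))

def markB (g : List (List Int)) (i j : Nat) : Bool :=
  decide (j < g.headI.length) && (cellN g i j == 0) && nbr8 g i j

-- common pointwise form of both results
def post (g : List (List Int)) : List (List Int) :=
  (List.range g.length).map (fun i =>
    (List.range ((g.getD i []).length)).map (fun j =>
      if markB g i j then 1 else cellN g i j))


theorem map_getD_range (row : List Int) : (List.range row.length).map (fun j => row.getD j 0) = row := by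
  apply List.ext_getElem
  · simp
  · intro i h1 h2; simp [List.getD_eq_getElem?_getD, List.getElem?_eq_getElem h2]

theorem foldl_set_range (cond : Int → Bool) (m : Nat) (row : List Int) (hm : m ≤ row.length) :
    ((PySem.List.pyRange 0 (m:Int) 1).foldl
      (fun nr c => if cond c then PySem.List.pySetD nr c 1 else nr) row)
    = (List.range row.length).map (fun j => if decide (j < m) && cond (j:Int) then 1 else row.getD j 0) := by
  induction m with
  | zero =>
    simp only [Nat.cast_zero, PySem.List.pyRange_one_eq_nil (le_refl 0)]
    simp only [Nat.not_lt_zero, decide_false, Bool.false_and, Bool.false_eq_true, if_false]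
    exact (map_getD_range row).symm
  | succ m ih =>
    have h1 : ((m+1 : Nat) : Int) = (m : Int) + 1 := by push_cast; ring
    rw [h1, PySem.List.pyRange_one_succ_right (by positivity), List.foldl_append]
    rw [ih (by omega)]
    by_cases hc : cond (m : Int) = true
    · simp only [List.foldl_cons, List.foldl_nil, hc, if_pos]
      rw [PySem.List.pySetD_natCast]
      apply List.ext_getElem
      · simp
      · intro k hk1 hk2
        simp only [List.length_map, List.length_range] at hk1 hk2
        rw [List.getElem_set]
        by_cases hkm : k = m
        · subst hkm
          simp [hc, List.getElem_map, List.getElem_range]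
        · simp only [List.getElem_map, List.getElem_range]
          simp [show (k < m + 1) ↔ (k < m) from by omega, (Ne.symm hkm : m ≠ k)]
    · simp only [List.foldl_cons, List.foldl_nil, hc, if_neg Bool.false_ne_true]
      apply List.map_eq_map_iff.mpr
      intro j hj
      by_cases hjm : j = m
      · subst hjm; simp [hc]
      · simp [show (j < m + 1) ↔ (j < m) from by omega]

theorem getC_natCast (g : List (List Int)) (i j : Nat) : getC g (i:Int) (j:Int) = cellN g i j := by
  simp [getC, cellN]


theorem some_eq_ite_iff {P : Prop} [Decidable P] (x y : Int) :
    (some x = if P then some y else none) ↔ (P ∧ x = y) := by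
  split_ifs with h <;> simp [h]

theorem solve_alt_eq_post (g : List (List Int)) (hp : Pre_solve g) : solve_alt g = post g := by
  unfold solve_alt post
  simp only [PySem.List.len_eq]
  have hcols : (if ((g.length:Int)) > 0 then ((PySem.List.pyGetD g 0 []).length : Int) else 0) = (g.headI.length : Int) := by
    cases g with
    | nil => simp
    | cons x xs => simp [PySem.List.pyGetD_zero_cons]
  rw [hcols]
  apply List.ext_getElem
  · simp [PySem.List.length_enumerate]
  · intro i h1 h2
    simp only [List.getElem_map, List.getElem_range, PySem.List.getElem_enumerate, zero_add]
    have hi : i < g.length := by simpa using h2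
    have hmem : g[i] ∈ g := List.getElem_mem _
    have hm : g.headI.length ≤ g[i].length := hp _ hmem
    rw [foldl_set_range _ _ _ hm]
    have hgetD : g.getD i [] = g[i] := List.getD_eq_getElem g [] hi
    rw [hgetD]
    apply List.map_eq_map_iff.mpr
    intro j hj
    simp only [List.mem_range] at hj
    have hcell : cellN g i j = g[i].getD j 0 := by simp [cellN, List.getD_eq_getElem?_getD, List.getElem?_eq_getElem hi]
    by_cases hjm : j < g.headI.length
    · -- main case: compare conditions
      have hcell2 : g[i].getD j 0 = g[i][j]'(by omega) := List.getD_eq_getElem _ _ (by omega)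
      have hiff : ((decide (j < g.headI.length) &&
          ((PySem.List.pyGetD g[i] (j:Int) 0 == 0) &&
           (List.contains [
              (if (0:Int) ≤ (i:Int) - 1 ∧ (i:Int) - 1 < (g.length:Int) ∧ (0:Int) ≤ (j:Int) ∧ (j:Int) < (g.headI.length:Int) then some (getC g ((i:Int)-1) (j:Int)) else none),
              (if (0:Int) ≤ (i:Int) + 1 ∧ (i:Int) + 1 < (g.length:Int) ∧ (0:Int) ≤ (j:Int) ∧ (j:Int) < (g.headI.length:Int) then some (getC g ((i:Int)+1) (j:Int)) else none),
              (if (0:Int) ≤ (i:Int) ∧ (i:Int) < (g.length:Int) ∧ (0:Int) ≤ (j:Int) - 1 ∧ (j:Int) - 1 < (g.headI.length:Int) then some (getC g (i:Int) ((j:Int)-1)) else none),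
              (if (0:Int) ≤ (i:Int) ∧ (i:Int) < (g.length:Int) ∧ (0:Int) ≤ (j:Int) + 1 ∧ (j:Int) + 1 < (g.headI.length:Int) then some (getC g (i:Int) ((j:Int)+1)) else none)]
              (some 8)))) = true) ↔ (markB g i j = true) := by
        simp only [Bool.and_eq_true, decide_eq_true_eq, beq_iff_eq, List.contains_eq_mem,
          List.mem_cons, List.not_mem_nil, or_false,
          PySem.List.pyGetD_natCast, some_eq_ite_iff, markB, nbr8, Bool.or_eq_true]
        rw [hcell]
        constructor
        · rintro ⟨hjm', hz, hnb⟩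
          refine ⟨⟨hjm', hz⟩, ?_⟩
          rcases hnb with ⟨⟨ha,hb',-,-⟩,h8⟩|⟨⟨-,hb',-,-⟩,h8⟩|⟨⟨-,-,hc',-⟩,h8⟩|⟨⟨-,-,-,hd'⟩,h8⟩
          · left; left; left
            have h1i : 1 ≤ i := by omega
            have hc : ((i:Int) - 1) = ((i - 1 : Nat) : Int) := by omega
            rw [hc, getC_natCast] at h8
            exact ⟨h1i, h8.symm⟩
          · left; left; right
            have hlt : i + 1 < g.length := by omega
            have hc : ((i:Int) + 1) = ((i + 1 : Nat) : Int) := by push_cast; ring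
            rw [hc, getC_natCast] at h8
            exact ⟨hlt, h8.symm⟩
          · left; right
            have h1j : 1 ≤ j := by omega
            have hc : ((j:Int) - 1) = ((j - 1 : Nat) : Int) := by omega
            rw [hc, getC_natCast] at h8
            exact ⟨h1j, h8.symm⟩
          · right
            have hlt : j + 1 < g.headI.length := by omega
            have hc : ((j:Int) + 1) = ((j + 1 : Nat) : Int) := by push_cast; ring
            rw [hc, getC_natCast] at h8
            exact ⟨hlt, h8.symm⟩
        · rintro ⟨⟨hjm', hz⟩, hnb⟩
          refine ⟨hjm', hz, ?_⟩
          rcases hnb with ((⟨h1i, h8⟩|⟨hlt, h8⟩)|⟨h1j, h8⟩)|⟨hlt, h8⟩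
          · left
            have hc : ((i:Int) - 1) = ((i - 1 : Nat) : Int) := by omega
            refine ⟨⟨by omega, by omega, by omega, by omega⟩, ?_⟩
            rw [hc, getC_natCast]; exact h8.symm
          · right; left
            have hc : ((i:Int) + 1) = ((i + 1 : Nat) : Int) := by push_cast; ring
            refine ⟨⟨by omega, by omega, by omega, by omega⟩, ?_⟩
            rw [hc, getC_natCast]; exact h8.symm
          · right; right; left
            have hc : ((j:Int) - 1) = ((j - 1 : Nat) : Int) := by omega
            refine ⟨⟨by omega, by omega, by omega, by omega⟩, ?_⟩
            rw [hc, getC_natCast]; exact h8.symm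
          · right; right; right
            have hc : ((j:Int) + 1) = ((j + 1 : Nat) : Int) := by push_cast; ring
            refine ⟨⟨by omega, by omega, by omega, by omega⟩, ?_⟩
            rw [hc, getC_natCast]; exact h8.symm
      by_cases hM : markB g i j = true
      · rw [if_pos (hiff.mpr hM), if_pos hM]
      · rw [if_neg (fun h => hM (hiff.mp h)), if_neg hM, hcell]
    · -- j ≥ cols: both conditions false
      simp [markB, hjm, hcell]

theorem foldl_flatMap' {α β γ : Type} (l : List β) (h : β → List γ) (f : α → γ → α) (b : α) :
    (l.flatMap h).foldl f b = l.foldl (fun x ys => (h ys).foldl f x) b := by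
  induction l generalizing b with
  | nil => rfl
  | cons x xs ih => simp only [List.flatMap_cons, List.foldl_append, List.foldl_cons]; exact ih _

theorem foldl_nested {α β γ δ : Type} (l1 : List β) (l2 : List γ) (p : β → γ → Bool)
    (nb : β → γ → List δ) (q : δ → Bool) (st : α → δ → α) (init : α) :
    l1.foldl (fun a r => l2.foldl (fun a c =>
        if p r c then (nb r c).foldl (fun a d => if q d then st a d else a) a else a) a) init
    = (l1.flatMap (fun r => l2.flatMap (fun c =>
        if p r c then (nb r c).filter q else []))).foldl st init := by
  rw [foldl_flatMap']
  have hfun : (fun (a : α) (r : β) => l2.foldl (fun a c =>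
      if p r c then (nb r c).foldl (fun a d => if q d then st a d else a) a else a) a)
      = (fun (a : α) (r : β) => ((l2.flatMap (fun c =>
          if p r c then (nb r c).filter q else []))).foldl st a) := by
    funext a r
    rw [foldl_flatMap']
    have hinner : (fun (a : α) (c : γ) =>
        if p r c then (nb r c).foldl (fun a d => if q d then st a d else a) a else a)
        = (fun (a : α) (c : γ) => (if p r c then (nb r c).filter q else []).foldl st a) := by
      funext a c
      by_cases hpc : p r c = true
      · simp [hpc, List.foldl_filter]
      · simp [hpc]
    rw [hinner]
  rw [hfun]

def writesF (g : List (List Int)) (rows cols : Int) : List (Int × Int) :=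
  (PySem.List.pyRange 0 rows 1).flatMap (fun r =>
    (PySem.List.pyRange 0 cols 1).flatMap (fun c =>
      if getC g r c == 8 then
        ([(r-1,c),(r+1,c),(r,c-1),(r,c+1)] : List (Int × Int)).filter
          (fun p => isValid rows cols p.1 p.2 && (getC g p.1 p.2 == 0))
      else []))

theorem solve_eq_foldl_writes (g : List (List Int)) :
    solve g = (writesF g (g.length:Int) (g.headI.length:Int)).foldl
      (fun out p => setCell out p.1 p.2 1) g := by
  unfold solve writesF
  simp only [PySem.List.len_eq, List.map_id']
  have hcols : (if ((g.length:Int)) > 0 then ((PySem.List.pyGetD g 0 []).length : Int) else 0) = (g.headI.length : Int) := by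
    cases g with
    | nil => simp
    | cons x xs => simp [PySem.List.pyGetD_zero_cons]
  rw [hcols]
  exact foldl_nested _ _ _ _ _ _ _

def cell2 (out : List (List Int)) (i j : Nat) : Option Int := (out[i]?.getD [])[j]?

theorem setCell_length (out : List (List Int)) (r c v : Int) :
    (setCell out r c v).length = out.length := by
  simp [setCell, PySem.List.length_pySetD]

theorem setCell_rowlen (out : List (List Int)) (r c v : Int) (h0 : 0 ≤ r) (k : Nat) :
    ((setCell out r c v)[k]?.getD []).length = (out[k]?.getD []).length := by
  unfold setCell
  rw [PySem.List.pySetD_of_nonneg out _ h0]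
  rw [List.getElem?_set]
  by_cases hk : r.toNat = k
  · subst hk
    by_cases hlt : r.toNat < out.length
    · simp only [if_pos hlt]
      have : PySem.List.pyGetD out r [] = out[r.toNat] := by
        apply PySem.List.pyGetD_eq_getElem out [] h0
        omega
      simp [this, PySem.List.length_pySetD, List.getElem?_eq_getElem hlt]
    · simp only [if_neg hlt]
      have : out[r.toNat]? = none := by simp; omega
      simp [this]
  · simp [hk]

theorem cell2_setCell (out : List (List Int)) (r c v : Int) (i j : Nat)
    (h0r : 0 ≤ r) (h0c : 0 ≤ c) (hr : r < (out.length:Int))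
    (hc : c < ((out[r.toNat]?.getD []).length : Int)) :
    cell2 (setCell out r c v) i j = if r = (i:Int) ∧ c = (j:Int) then some v else cell2 out i j := by
  have hrn : r.toNat < out.length := by omega
  have hrow : PySem.List.pyGetD out r [] = out[r.toNat] := by
    apply PySem.List.pyGetD_eq_getElem out [] h0r
    omega
  have hcn : c.toNat < out[r.toNat].length := by
    rw [List.getElem?_eq_getElem hrn] at hc
    simp at hc; omega
  unfold cell2 setCell
  rw [hrow, PySem.List.pySetD_of_nonneg out _ h0r, PySem.List.pySetD_of_nonneg _ _ h0c]
  by_cases hri : r = (i:Int)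
  · have hri' : r.toNat = i := by omega
    subst hri'
    simp only [List.getElem?_set_self, hrn]
    rw [List.getElem?_eq_getElem hrn]
    simp only [Option.getD_some]
    by_cases hcj : c = (j:Int)
    · have hcj' : c.toNat = j := by omega
      subst hcj'
      rw [if_pos ⟨hri, hcj⟩]
      simp [hcn]
    · have hcj' : ¬ (c.toNat = j) := by omega
      rw [List.getElem?_set_ne hcj']
      rw [if_neg (by tauto : ¬ (r = ((r.toNat:Nat):Int) ∧ c = (j:Int)))]
  · have hri' : ¬ (r.toNat = i) := by omega
    rw [List.getElem?_set_ne hri']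
    rw [if_neg (by tauto : ¬ (r = (i:Int) ∧ c = (j:Int)))]

theorem cell2_foldl (ps : List (Int × Int)) : ∀ (out : List (List Int)) (i j : Nat),
    (∀ p ∈ ps, 0 ≤ p.1 ∧ p.1 < (out.length:Int) ∧ 0 ≤ p.2 ∧
      p.2 < ((out[p.1.toNat]?.getD []).length : Int)) →
    cell2 (ps.foldl (fun o p => setCell o p.1 p.2 1) out) i j
    = if ((i:Int),(j:Int)) ∈ ps then some 1 else cell2 out i j := by
  induction ps with
  | nil => intro out i j _; simp
  | cons p ps ih =>
    intro out i j hps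
    have hp := hps p (List.mem_cons_self ..)
    have hshape : ∀ k : Nat, ((setCell out p.1 p.2 1)[k]?.getD []).length = (out[k]?.getD []).length :=
      setCell_rowlen out p.1 p.2 1 hp.1
    have hlen : (setCell out p.1 p.2 1).length = out.length := setCell_length ..
    simp only [List.foldl_cons]
    rw [ih (setCell out p.1 p.2 1) i j (by
      intro q hq
      have := hps q (List.mem_cons_of_mem _ hq)
      rw [hlen, hshape]
      exact this)]
    by_cases hmem : ((i:Int),(j:Int)) ∈ ps
    · rw [if_pos hmem, if_pos (List.mem_cons_of_mem _ hmem)]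
    · rw [if_neg hmem]
      rw [cell2_setCell out p.1 p.2 1 i j hp.1 hp.2.2.1 hp.2.1 hp.2.2.2]
      by_cases hpij : p = ((i:Int),(j:Int))
      · have hm1 : ((i:Int),(j:Int)) ∈ p :: ps := by simp [hpij]
        rw [if_pos (show p.1 = (i:Int) ∧ p.2 = (j:Int) by rw [hpij]; exact ⟨rfl, rfl⟩), if_pos hm1]
      · have h1 : ¬ (p.1 = (i:Int) ∧ p.2 = (j:Int)) := by
          intro ⟨ha, hb⟩; exact hpij (Prod.ext ha hb)
        have hm1 : ¬ (((i:Int),(j:Int)) ∈ p :: ps) := by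
          intro h
          rcases List.mem_cons.mp h with he | hm
          · exact hpij he.symm
          · exact hmem hm
        rw [if_neg h1, if_neg hm1]

theorem mem_writesF (g : List (List Int)) (i j : Nat) :
    (((i:Int),(j:Int)) ∈ writesF g (g.length:Int) (g.headI.length:Int))
    ↔ (i < g.length ∧ markB g i j = true) := by
  simp only [writesF, List.mem_flatMap, PySem.List.mem_pyRange_one, List.mem_ite_nil_right,
    List.mem_filter, List.mem_cons, List.not_mem_nil, or_false, Prod.mk.injEq,
    isValid, Bool.and_eq_true, decide_eq_true_eq, beq_iff_eq,
    markB, nbr8, Bool.or_eq_true]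
  constructor
  · rintro ⟨r, ⟨hr0, hrn⟩, c, ⟨hc0, hcm⟩, h8, hnb, ⟨⟨-, hin⟩, -, hjm⟩, hz⟩
    have hin' : i < g.length := by omega
    have hjm' : j < g.headI.length := by omega
    have hz' : cellN g i j = 0 := by rw [← getC_natCast]; exact hz
    refine ⟨hin', ⟨hjm', hz'⟩, ?_⟩
    rcases hnb with ⟨hir, hjc⟩ | ⟨hir, hjc⟩ | ⟨hir, hjc⟩ | ⟨hir, hjc⟩
    · left; left; right
      have hr : r = ((i+1 : Nat):Int) := by omega
      have hc : c = ((j : Nat):Int) := by omega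
      rw [hr, hc, getC_natCast] at h8
      exact ⟨by omega, h8⟩
    · left; left; left
      have hr : r = ((i-1 : Nat):Int) := by omega
      have hc : c = ((j : Nat):Int) := by omega
      rw [hr, hc, getC_natCast] at h8
      exact ⟨by omega, h8⟩
    · right
      have hr : r = ((i : Nat):Int) := by omega
      have hc : c = ((j+1 : Nat):Int) := by omega
      rw [hr, hc, getC_natCast] at h8
      exact ⟨by omega, h8⟩
    · left; right
      have hr : r = ((i : Nat):Int) := by omega
      have hc : c = ((j-1 : Nat):Int) := by omega
      rw [hr, hc, getC_natCast] at h8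
      exact ⟨by omega, h8⟩
  · rintro ⟨hin, ⟨hjm, hz⟩, hnb⟩
    have hz' : getC g (i:Int) (j:Int) = 0 := by rw [getC_natCast]; exact hz
    rcases hnb with ((⟨h1i, h8⟩ | ⟨hlt, h8⟩) | ⟨h1j, h8⟩) | ⟨hlt, h8⟩
    · refine ⟨((i-1 : Nat):Int), ⟨by omega, by omega⟩, ((j : Nat):Int), ⟨by omega, by omega⟩,
        by rw [getC_natCast]; exact h8, ?_, ⟨⟨by omega, by omega⟩, by omega, by omega⟩, hz'⟩
      right; left; exact ⟨by omega, rfl⟩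
    · refine ⟨((i+1 : Nat):Int), ⟨by omega, by omega⟩, ((j : Nat):Int), ⟨by omega, by omega⟩,
        by rw [getC_natCast]; exact h8, ?_, ⟨⟨by omega, by omega⟩, by omega, by omega⟩, hz'⟩
      left; exact ⟨by omega, rfl⟩
    · refine ⟨((i : Nat):Int), ⟨by omega, by omega⟩, ((j-1 : Nat):Int), ⟨by omega, by omega⟩,
        by rw [getC_natCast]; exact h8, ?_, ⟨⟨by omega, by omega⟩, by omega, by omega⟩, hz'⟩
      right; right; right; exact ⟨rfl, by omega⟩
    · refine ⟨((i : Nat):Int), ⟨by omega, by omega⟩, ((j+1 : Nat):Int), ⟨by omega, by omega⟩,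
        by rw [getC_natCast]; exact h8, ?_, ⟨⟨by omega, by omega⟩, by omega, by omega⟩, hz'⟩
      right; right; left; exact ⟨rfl, by omega⟩

theorem writesF_valid (g : List (List Int)) (hp : Pre_solve g) :
    ∀ p ∈ writesF g (g.length:Int) (g.headI.length:Int),
      0 ≤ p.1 ∧ p.1 < (g.length:Int) ∧ 0 ≤ p.2 ∧ p.2 < ((g[p.1.toNat]?.getD []).length : Int) := by
  intro p hmem
  simp only [writesF, List.mem_flatMap, PySem.List.mem_pyRange_one, List.mem_ite_nil_right,
    List.mem_filter, List.mem_cons, List.not_mem_nil, or_false, isValid,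
    Bool.and_eq_true, decide_eq_true_eq, beq_iff_eq] at hmem
  obtain ⟨r, -, c, -, -, -, ⟨⟨h0i, hin⟩, h0j, hjm⟩, -⟩ := hmem
  have hlt : p.1.toNat < g.length := by omega
  have hrow : g[p.1.toNat]?.getD [] = g[p.1.toNat] := by simp [List.getElem?_eq_getElem hlt]
  rw [hrow]
  have hlen := hp g[p.1.toNat] (List.getElem_mem hlt)
  exact ⟨h0i, hin, h0j, by omega⟩

theorem foldl_setCell_length (ps : List (Int × Int)) : ∀ (out : List (List Int)),
    (ps.foldl (fun o p => setCell o p.1 p.2 1) out).length = out.length := by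
  induction ps with
  | nil => intro _; rfl
  | cons p ps ih => intro out; simp only [List.foldl_cons]; rw [ih, setCell_length]

theorem foldl_setCell_rowlen (ps : List (Int × Int)) (hps : ∀ p ∈ ps, 0 ≤ p.1) :
    ∀ (out : List (List Int)) (k : Nat),
    ((ps.foldl (fun o p => setCell o p.1 p.2 1) out)[k]?.getD []).length
      = ((out[k]?.getD []).length) := by
  induction ps with
  | nil => intro _ _; rfl
  | cons p ps ih =>
    intro out k
    simp only [List.foldl_cons]
    rw [ih (fun q hq => hps q (List.mem_cons_of_mem _ hq)) _ k,
      setCell_rowlen _ _ _ _ (hps p (List.mem_cons_self ..))]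

theorem solve_eq_post (g : List (List Int)) (hp : Pre_solve g) : solve g = post g := by
  rw [solve_eq_foldl_writes]
  have hvalid := writesF_valid g hp
  have hps0 : ∀ p ∈ writesF g (g.length:Int) (g.headI.length:Int), 0 ≤ p.1 :=
    fun p hm => (hvalid p hm).1
  unfold post
  apply List.ext_getElem
  · simp [foldl_setCell_length]
  · intro i h1 h2
    have hlenF := foldl_setCell_length (writesF g (g.length:Int) (g.headI.length:Int)) g
    have hi : i < g.length := by
      simpa using h2
    have hgetD : g.getD i [] = g[i] := List.getD_eq_getElem g [] hi
    apply List.ext_getElem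
    · have hrl := foldl_setCell_rowlen _ hps0 g i
      rw [List.getElem?_eq_getElem h1, List.getElem?_eq_getElem hi] at hrl
      simp only [Option.getD_some] at hrl
      simp [hrl, List.getD_eq_getElem?_getD, List.getElem?_eq_getElem hi]
    · intro j hj1 hj2
      simp only [List.getElem_map, List.getElem_range] at hj2 ⊢
      have hjrow : j < g[i].length := by rw [← hgetD]; simpa using hj2
      have hchar := cell2_foldl (writesF g (g.length:Int) (g.headI.length:Int)) g i j hvalid
      have hjF : j < ((writesF g (g.length:Int) (g.headI.length:Int)).foldl (fun o p => setCell o p.1 p.2 1) g)[i].length := by omega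
      have hcF : cell2 ((writesF g (g.length:Int) (g.headI.length:Int)).foldl (fun o p => setCell o p.1 p.2 1) g) i j
          = some (((writesF g (g.length:Int) (g.headI.length:Int)).foldl (fun o p => setCell o p.1 p.2 1) g)[i][j]'(by omega)) := by
        simp [cell2, List.getElem?_eq_getElem (by omega : i < ((writesF g (g.length:Int) (g.headI.length:Int)).foldl (fun o p => setCell o p.1 p.2 1) g).length), List.getElem?_eq_getElem hjF]
      have hcg : cell2 g i j = some (g[i][j]'hjrow) := by
        simp [cell2, List.getElem?_eq_getElem hi, List.getElem?_eq_getElem hjrow]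
      have hcellN : cellN g i j = g[i][j]'hjrow := by
        simp [cellN, List.getD_eq_getElem?_getD, List.getElem?_eq_getElem hi,
          List.getElem?_eq_getElem hjrow]
      rw [hcF] at hchar
      by_cases hM : markB g i j = true
      · rw [if_pos ((mem_writesF g i j).mpr ⟨hi, hM⟩)] at hchar
        rw [Option.some.injEq] at hchar
        rw [hchar, if_pos hM]
      · have hnm : ¬ (((i:Int),(j:Int)) ∈ writesF g (g.length:Int) (g.headI.length:Int)) := by
          intro h
          exact hM ((mem_writesF g i j).mp h).2
        rw [if_neg hnm, hcg, Option.some.injEq] at hchar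
        rw [hchar, if_neg hM, hcellN]

-- ===== VERDICT (by name: the statement is the Claim_ definition above) =====
theorem solve_spec : Claim_equal_solve := by
  intro g _ hp
  unfold Spec_solve
  rw [solve_eq_post g hp, solve_alt_eq_post g hp]
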